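-- pv_equiv track=rewrite | github.com/slavakargin/RandomGeometricStructures | rgs/mndrpy/DyckPaths.py | areaDyckPath
-- ===== SOURCE A (Python) =====
-- def areaDyckPath(path):
--     ''' calculate the area of the given Dyck path, defined as the number
--     of unit squares under the path but above the line y = x'''
--     if isinstance(path, list):
--         n = int(len(path)/2)
--     else:
--         n = int(path.shape[0]/2)
--     x = 0
--     y = 0
--     S = [(x, y)]
--     for i in range(2 * n):
--         if path[i] == 1:
--             y += 1
--         else:
--             x += 1
--         S.append((x,y))
--     area = 0
--     y_prev = 0
--     for p in S: #every time as y increases, we add y - x - 1 to the area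
--         if p[1] > y_prev:
--             area += p[1] - p[0]- 1
--             y_prev = p[1]
--     return area
-- ===== SOURCE B (Python) =====
-- def areaDyckPath(path):
--     ''' calculate the area of the given Dyck path, defined as the number
--     of unit squares under the path but above the line y = x'''
--     if isinstance(path, list):
--         n = int(len(path)/2)
--     else:
--         n = int(path.shape[0]/2)
--     h = 0
--     area = 0
--     for i in range(2 * n):
--         if path[i] == 1:
--             area += h
--             h += 1
--         else:
--             h -= 1
--     return area
-- ===== Notes on version B (the rewrite author's own statement) =====
-- stated objective: simpler
-- what changed: B replaces A's two-pass design (build the full (x,y) point list, then rescan it for y-increases adding y-x-1) with a single pass maintaining one running height h = y - x, adding h on each up-step.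
import Mathlib
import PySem

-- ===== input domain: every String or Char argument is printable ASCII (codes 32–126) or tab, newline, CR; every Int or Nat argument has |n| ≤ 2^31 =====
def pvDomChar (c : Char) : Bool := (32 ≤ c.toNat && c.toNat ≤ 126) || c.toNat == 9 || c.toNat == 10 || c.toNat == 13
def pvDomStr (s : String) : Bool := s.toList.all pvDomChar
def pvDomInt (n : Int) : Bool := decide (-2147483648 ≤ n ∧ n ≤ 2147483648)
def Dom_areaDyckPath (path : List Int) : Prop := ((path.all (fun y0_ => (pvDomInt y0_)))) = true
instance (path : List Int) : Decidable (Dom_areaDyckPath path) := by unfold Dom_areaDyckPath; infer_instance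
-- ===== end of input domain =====

-- B: single pass with running height h = y - x instead of building the point list and rescanning it (simpler, O(1) extra space).
-- ===== PORT A =====
-- first loop: builds the list S of points after (0,0), step for step
def pvBuildS (steps : List Int) (x y : Int) : List (Int × Int) :=
  match steps with
  | [] => []
  | s :: rest =>
    if s = 1 then (x, y + 1) :: pvBuildS rest x (y + 1)
    else (x + 1, y) :: pvBuildS rest (x + 1) y

-- second loop: scan S, adding y - x - 1 each time y increases
def pvAreaScan (S : List (Int × Int)) (area yPrev : Int) : Int :=
  match S with
  | [] => area
  | p :: rest =>
    if p.2 > yPrev then pvAreaScan rest (area + p.2 - p.1 - 1) p.2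
    else pvAreaScan rest area yPrev

def areaDyckPath (path : List Int) : Int :=
  let n := path.length / 2
  let S := ((0 : Int), (0 : Int)) :: pvBuildS (path.take (2 * n)) 0 0
  pvAreaScan S 0 0

-- ===== PORT B =====
def pvAltLoop (steps : List Int) (h area : Int) : Int :=
  match steps with
  | [] => area
  | s :: rest =>
    if s = 1 then pvAltLoop rest (h + 1) (area + h)
    else pvAltLoop rest (h - 1) area

def areaDyckPath_alt (path : List Int) : Int :=
  let n := path.length / 2
  pvAltLoop (path.take (2 * n)) 0 0

-- ===== PRECONDITION & SPEC =====
def Spec_areaDyckPath (path : List Int) (out : Int) : Prop := out = areaDyckPath_alt path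
instance (path : List Int) (out : Int) : Decidable (Spec_areaDyckPath path out) := by unfold Spec_areaDyckPath; infer_instance

-- ===== CLAIM (what is proved, stated in full; the proofs are below) =====
def Claim_equal_areaDyckPath : Prop := ∀ (path : List Int), Dom_areaDyckPath path → Spec_areaDyckPath path (areaDyckPath path)

-- ===== LEMMAS AND PROOFS =====

-- ===== VERDICT (by name: the statement is the Claim_ definition above) =====
theorem pv_scan_eq_alt (steps : List Int) (x y area : Int) :
    pvAreaScan (pvBuildS steps x y) area y = pvAltLoop steps (y - x) area := by
  induction steps generalizing x y area with
  | nil => rfl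
  | cons s rest ih =>
    by_cases hs : s = 1
    · subst hs
      rw [pvBuildS, if_pos rfl, pvAreaScan,
          if_pos (show (((x : Int), y + 1).2 : Int) > y by dsimp; omega),
          pvAltLoop, if_pos rfl, ih]
      dsimp only
      ring_nf
    · rw [pvBuildS, if_neg hs, pvAreaScan,
          if_neg (show ¬ (((x : Int) + 1, y).2 : Int) > y by dsimp; omega),
          pvAltLoop, if_neg hs, ih]
      ring_nf
theorem areaDyckPath_spec : Claim_equal_areaDyckPath := by
  intro path _
  unfold Spec_areaDyckPath areaDyckPath areaDyckPath_alt
  simp only [pvAreaScan]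
  rw [if_neg (by omega : ¬ (0 : Int) > 0)]
  simpa using pv_scan_eq_alt (path.take (2 * (path.length / 2))) 0 0 0
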